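-- pv_equiv track=rewrite | github.com/RishDS/PythonPractice | W3-lone_sum.py | lone_sum
-- ===== SOURCE A (Python) =====
-- def lone_sum(a, b, c):
--     values = [a,b,c]
--     unique_values = {a, b, c}
--     if len(unique_values) == 3:
--         return a + b + c
--     for i in values:
--        if values.count(i)==1:
--           return i
--     return 0
-- ===== SOURCE B (Python) =====
-- def lone_sum(a, b, c):
--     if a == b == c:
--         return 0
--     elif a == b:
--         return c
--     elif a == c:
--         return b
--     elif b == c:
--         return a
--     else:
--         return a + b + c
-- ===== Notes on version B (the rewrite author's own statement) =====
-- stated objective: simpler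
-- what changed: Replaces the list/set construction and count() scans with a direct chain of pairwise equality comparisons.
import Mathlib
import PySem

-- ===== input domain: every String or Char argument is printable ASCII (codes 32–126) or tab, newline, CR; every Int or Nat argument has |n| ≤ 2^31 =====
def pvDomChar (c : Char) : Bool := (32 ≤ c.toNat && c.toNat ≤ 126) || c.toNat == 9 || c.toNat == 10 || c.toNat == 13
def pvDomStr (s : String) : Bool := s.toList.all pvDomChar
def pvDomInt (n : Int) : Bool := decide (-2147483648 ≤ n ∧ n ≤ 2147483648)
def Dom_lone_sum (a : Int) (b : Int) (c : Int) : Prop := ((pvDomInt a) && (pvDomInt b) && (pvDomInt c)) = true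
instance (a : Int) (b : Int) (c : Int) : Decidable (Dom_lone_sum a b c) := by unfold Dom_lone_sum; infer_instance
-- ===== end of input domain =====

-- B: replaces the list/set + count() approach with a chain of pairwise equality comparisons (simpler).


-- ===== PORT A =====
-- helper for A's 'for i in values: if values.count(i)==1: return i' loop (returns 0 when exhausted)
def loneLoop (values : List Int) : List Int → Int
  | [] => 0
  | i :: rest => if values.count i == 1 then i else loneLoop values rest

def lone_sum (a : Int) (b : Int) (c : Int) : Int :=
  let values := [a, b, c]
  let unique_values := PySem.Set.ofList [a, b, c]
  if PySem.Set.len unique_values == 3 then a + b + c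
  else loneLoop values values

-- ===== PORT B =====
def lone_sum_alt (a : Int) (b : Int) (c : Int) : Int :=
  if a = b ∧ b = c then 0
  else if a = b then c
  else if a = c then b
  else if b = c then a
  else a + b + c

-- ===== PRECONDITION & SPEC =====
def Spec_lone_sum (a : Int) (b : Int) (c : Int) (out : Int) : Prop := out = lone_sum_alt a b c
instance (a : Int) (b : Int) (c : Int) (out : Int) : Decidable (Spec_lone_sum a b c out) := by unfold Spec_lone_sum; infer_instance

-- ===== CLAIM (what is proved, stated in full; the proofs are below) =====
def Claim_equal_lone_sum : Prop := ∀ (a : Int) (b : Int) (c : Int), Dom_lone_sum a b c → Spec_lone_sum a b c (lone_sum a b c)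

-- ===== LEMMAS AND PROOFS =====

-- ===== VERDICT (by name: the statement is the Claim_ definition above) =====
theorem lone_sum_spec : Claim_equal_lone_sum := by
  intro a b c _
  unfold Spec_lone_sum lone_sum lone_sum_alt
  by_cases hab : a = b <;> by_cases hac : a = c <;> by_cases hbc : b = c <;>
    simp_all [loneLoop, PySem.Set.ofList, PySem.Set.add, PySem.Set.len,
      PySem.Set.contains, List.count_cons, eq_comm] <;> omega
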